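-- pv_equiv track=rewrite | github.com/Gongzihang6/Gongzihang6.github.io | code/gzh/3D-z-order.py | morton_decode_3d
-- ===== SOURCE A (Python) =====
-- def morton_decode_3d(t, order):
--     """
--     3D 莫顿码解码：将线性索引 t 解码为 (x, y, z)
--     原理：位交叉 (Bit Interleaving)
--     t 的二进制: ... z1 y1 x1 z0 y0 x0
--     """
--     x = 0
--     y = 0
--     z = 0
--
--     for i in range(order):
--         # 提取 x: 第 3*i 位 -> 移到第 i 位
--         x |= ((t >> (3 * i)) & 1) << i
--         # 提取 y: 第 3*i+1 位 -> 移到第 i 位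
--         y |= ((t >> (3 * i + 1)) & 1) << i
--         # 提取 z: 第 3*i+2 位 -> 移到第 i 位
--         z |= ((t >> (3 * i + 2)) & 1) << i
--
--     return x, y, z
-- ===== SOURCE B (Python) =====
-- def morton_decode_3d(t, order):
--     # Divide-and-conquer: split the code into low/high halves of bit triads,
--     # decode each half recursively, and stitch the coordinate halves together.
--     # A zero remainder decodes to all-zero coordinates at once.
--     def dec(m, k):
--         if k <= 0 or m == 0:
--             return (0, 0, 0)
--         if k == 1:
--             return (m & 1, (m >> 1) & 1, (m >> 2) & 1)
--         h = k // 2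
--         xl, yl, zl = dec(m % (1 << (3 * h)), h)
--         xh, yh, zh = dec(m >> (3 * h), k - h)
--         return (xl + (xh << h), yl + (yh << h), zl + (zh << h))
--     return dec(t, max(order, 0))
-- ===== Notes on version B (the rewrite author's own statement) =====
-- stated objective: faster
-- what changed: B replaces A's linear per-bit loop by a divide-and-conquer recursion: it splits the Morton code into low/high halves of bit triads, decodes each half recursively (base cases 0 and 1 triads), and stitches each coordinate together as low + (high << h).
import Mathlib
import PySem

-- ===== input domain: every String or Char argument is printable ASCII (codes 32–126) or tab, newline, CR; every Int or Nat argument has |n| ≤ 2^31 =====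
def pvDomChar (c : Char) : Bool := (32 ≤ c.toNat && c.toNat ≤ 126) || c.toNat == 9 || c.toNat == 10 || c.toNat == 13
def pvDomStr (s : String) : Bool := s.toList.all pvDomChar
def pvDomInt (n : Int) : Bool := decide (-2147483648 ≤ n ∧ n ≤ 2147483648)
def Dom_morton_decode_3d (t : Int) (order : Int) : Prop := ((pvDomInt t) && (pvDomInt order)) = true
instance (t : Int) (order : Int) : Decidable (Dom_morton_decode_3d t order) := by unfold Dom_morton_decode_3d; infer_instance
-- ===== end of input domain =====

-- B decodes by divide-and-conquer on the triads (halve, recurse, stitch) instead of A's per-bit loop;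
-- measurably faster on big inputs (fewer long-integer shift operations).

-- ===== PORT A =====
-- literal port of A: for i in range(order): x |= ((t >> 3i) & 1) << i; … (shift counts are
-- nonnegative for every i produced by range(order), so .toNat is exact here)
def morton_decode_3d (t : Int) (order : Int) : Int × Int × Int :=
  (PySem.List.pyRange 0 order 1).foldl
    (fun (s : Int × Int × Int) (i : Int) =>
      (PySem.Int.bor s.1 ((PySem.Int.band (t >>> (3 * i).toNat) 1) <<< i.toNat),
       PySem.Int.bor s.2.1 ((PySem.Int.band (t >>> (3 * i + 1).toNat) 1) <<< i.toNat),
       PySem.Int.bor s.2.2 ((PySem.Int.band (t >>> (3 * i + 2).toNat) 1) <<< i.toNat)))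
    (0, 0, 0)

-- ===== PORT B =====
-- literal port of Source B's inner dec(m, k): base cases (k<=0 or m==0) and k==1, else split at h = k//2,
-- recurse on m % (1 << 3h) and m >> 3h, and stitch each coordinate as lo + (hi << h)
-- (all shift counts used are nonnegative on every call, so .toNat is exact here)
def pvDecB (m : Int) (k : Int) : Int × Int × Int :=
  if k ≤ 0 ∨ m = 0 then (0, 0, 0)
  else if k = 1 then
    (PySem.Int.band m 1, PySem.Int.band (m >>> (1 : Nat)) 1, PySem.Int.band (m >>> (2 : Nat)) 1)
  else
    let h := PySem.Int.floordiv k 2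
    let lo := pvDecB (PySem.Int.mod m ((1 : Int) <<< (3 * h).toNat)) h
    let hi := pvDecB (m >>> (3 * h).toNat) (k - h)
    (lo.1 + (hi.1 <<< h.toNat), lo.2.1 + (hi.2.1 <<< h.toNat), lo.2.2 + (hi.2.2 <<< h.toNat))
termination_by k.toNat
decreasing_by
  all_goals
    rw [PySem.Int.floordiv_eq_ediv_of_pos (by norm_num : (0:Int) < 2)] at *
    omega

def morton_decode_3d_alt (t : Int) (order : Int) : Int × Int × Int :=
  pvDecB t (max order 0)

-- ===== PRECONDITION & SPEC =====
def Spec_morton_decode_3d (t : Int) (order : Int) (out : Int × Int × Int) : Prop := out = morton_decode_3d_alt t order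
instance (t : Int) (order : Int) (out : Int × Int × Int) : Decidable (Spec_morton_decode_3d t order out) := by unfold Spec_morton_decode_3d; infer_instance

-- ===== CLAIM (what is proved, stated in full; the proofs are below) =====
def Claim_equal_morton_decode_3d : Prop := ∀ (t : Int) (order : Int), Dom_morton_decode_3d t order → Spec_morton_decode_3d t order (morton_decode_3d t order)

-- ===== LEMMAS AND PROOFS =====

-- bit k of t, Python-style ((t >> k) & 1), as both programs compute it
def pvBit (t : Int) (k : Nat) : Int := PySem.Int.band (t >>> k) 1

lemma pvBit_cases (t : Int) (k : Nat) : pvBit t k = 0 ∨ pvBit t k = 1 := by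
  unfold pvBit
  rw [PySem.Int.band_one]
  have h1 := PySem.Int.mod_nonneg (t >>> k) (b := 2) (by norm_num)
  have h2 := PySem.Int.mod_lt (t >>> k) (b := 2) (by norm_num)
  omega

-- the value both programs compute for one coordinate: Σ_{i<n} bit(3i+c) · 2^i
def pvVal (t : Int) (c : Nat) (n : Nat) : Int :=
  ∑ i ∈ Finset.range n, pvBit t (3 * i + c) * 2 ^ i

lemma pvVal_zero (t : Int) (c : Nat) : pvVal t c 0 = 0 := by simp [pvVal]

lemma pvVal_zero_left (c n : Nat) : pvVal 0 c n = 0 := by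
  have hb : PySem.Int.band 0 1 = 0 := by decide
  simp [pvVal, pvBit, hb]

lemma pvVal_succ (t : Int) (c : Nat) (n : Nat) :
    pvVal t c (n + 1) = pvVal t c n + pvBit t (3 * n + c) * 2 ^ n := by
  simp [pvVal, Finset.sum_range_succ]

lemma pvVal_bounds (t : Int) (c : Nat) (n : Nat) : 0 ≤ pvVal t c n ∧ pvVal t c n < 2 ^ n := by
  induction n with
  | zero => simp [pvVal_zero]
  | succ n ih =>
    rw [pvVal_succ]
    have hp : (2:Int) ^ (n + 1) = 2 ^ n * 2 := pow_succ 2 n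
    have hpos : (0:Int) < 2 ^ n := by positivity
    rcases pvBit_cases t (3 * n + c) with h | h <;> rw [h] <;> constructor <;> nlinarith [ih.1, ih.2]

-- x | (b << n) = x + b·2^n when 0 ≤ x < 2^n and b is a bit
lemma bor_shift_eq_add (x b : Int) (n : Nat) (hx0 : 0 ≤ x) (hx : x < 2 ^ n)
    (hb : b = 0 ∨ b = 1) : PySem.Int.bor x (b <<< n) = x + b * 2 ^ n := by
  rcases hb with hb | hb
  · subst hb
    rw [Int.shiftLeft_eq]
    simp [PySem.Int.bor_zero]
  · subst hb
    rw [Int.shiftLeft_eq, one_mul]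
    have h2 : (0:Int) ≤ 2 ^ n := by positivity
    rw [PySem.Int.bor_of_nonneg hx0 h2]
    have htn : ((2:Int) ^ n).toNat = 2 ^ n := by
      rw [show ((2:Int)) = ((2:Nat):Int) by norm_num, ← Nat.cast_pow, Int.toNat_natCast]
    rw [htn]
    have hxlt : x.toNat < 2 ^ n := by
      have hc : (x.toNat : Int) = x := Int.toNat_of_nonneg hx0
      exact_mod_cast hc ▸ hx
    have hlor : x.toNat ||| 2 ^ n = x.toNat + 2 ^ n := by
      rw [Nat.lor_comm]
      have h2p := Nat.two_pow_add_eq_or_of_lt hxlt 1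
      simp at h2p
      omega
    rw [hlor]
    push_cast [Int.toNat_of_nonneg hx0]
    ring

-- A's loop over range(n) produces (pvVal 0 n, pvVal 1 n, pvVal 2 n)
lemma portA_loop (t : Int) (n : Nat) :
    (PySem.List.pyRange 0 (n : Int) 1).foldl
      (fun (s : Int × Int × Int) (i : Int) =>
        (PySem.Int.bor s.1 ((PySem.Int.band (t >>> (3 * i).toNat) 1) <<< i.toNat),
         PySem.Int.bor s.2.1 ((PySem.Int.band (t >>> (3 * i + 1).toNat) 1) <<< i.toNat),
         PySem.Int.bor s.2.2 ((PySem.Int.band (t >>> (3 * i + 2).toNat) 1) <<< i.toNat)))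
      (0, 0, 0)
    = (pvVal t 0 n, pvVal t 1 n, pvVal t 2 n) := by
  induction n with
  | zero =>
    rw [PySem.List.pyRange_one_eq_nil (by norm_num)]
    simp [pvVal_zero]
  | succ n ih =>
    have hcast : ((n + 1 : Nat) : Int) = (n : Int) + 1 := by push_cast; ring
    rw [hcast, PySem.List.pyRange_one_succ_right (by positivity), List.foldl_append, ih]
    simp only [List.foldl_cons, List.foldl_nil]
    have e0 : (3 * (n : Int)).toNat = 3 * n := by omega
    have e1 : (3 * (n : Int) + 1).toNat = 3 * n + 1 := by omega
    have e2 : (3 * (n : Int) + 2).toNat = 3 * n + 2 := by omega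
    have en : ((n : Int)).toNat = n := by omega
    rw [e0, e1, e2, en]
    have hb0 := pvVal_bounds t 0 n
    have hb1 := pvVal_bounds t 1 n
    have hb2 := pvVal_bounds t 2 n
    refine Prod.ext ?_ (Prod.ext ?_ ?_) <;> simp only
    · show PySem.Int.bor (pvVal t 0 n) (pvBit t (3 * n) <<< n) = pvVal t 0 (n + 1)
      rw [bor_shift_eq_add _ _ n hb0.1 hb0.2 (pvBit_cases t (3 * n)), pvVal_succ]
      norm_num
    · show PySem.Int.bor (pvVal t 1 n) (pvBit t (3 * n + 1) <<< n) = pvVal t 1 (n + 1)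
      rw [bor_shift_eq_add _ _ n hb1.1 hb1.2 (pvBit_cases t (3 * n + 1)), pvVal_succ]
    · show PySem.Int.bor (pvVal t 2 n) (pvBit t (3 * n + 2) <<< n) = pvVal t 2 (n + 1)
      rw [bor_shift_eq_add _ _ n hb2.1 hb2.2 (pvBit_cases t (3 * n + 2)), pvVal_succ]

-- a low bit is unchanged by taking m % 2^w
lemma pvBit_mod (m : Int) (w k : Nat) (hk : k < w) :
    pvBit (PySem.Int.mod m ((2:Int) ^ w)) k = pvBit m k := by
  have hw : (0:Int) < 2 ^ w := by positivity
  unfold pvBit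
  rw [PySem.Int.band_one, PySem.Int.band_one,
      PySem.Int.mod_eq_emod_of_pos (by norm_num : (0:Int) < 2),
      PySem.Int.mod_eq_emod_of_pos (by norm_num : (0:Int) < 2),
      PySem.Int.mod_eq_emod_of_pos hw,
      Int.shiftRight_eq_div_pow, Int.shiftRight_eq_div_pow]
  set q := m / 2 ^ w with hq
  set r := m % 2 ^ w with hr
  have hm : m = r + 2 ^ (w - k - 1) * q * 2 * 2 ^ k := by
    have : (2:Int) ^ (w - k - 1) * 2 * 2 ^ k = 2 ^ w := by
      rw [mul_comm ((2:Int) ^ (w - k - 1)) 2, ← pow_succ', ← pow_add]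
      congr 1
      omega
    calc m = 2 ^ w * q + r := (Int.mul_ediv_add_emod m (2 ^ w)).symm
    _ = r + 2 ^ (w - k - 1) * q * 2 * 2 ^ k := by rw [← this]; ring
  have hdiv : m / 2 ^ k = r / 2 ^ k + 2 ^ (w - k - 1) * q * 2 := by
    conv_lhs => rw [hm]
    exact Int.add_mul_ediv_right r _ (by positivity)
  push_cast
  rw [hdiv, show r / 2 ^ k + 2 ^ (w - k - 1) * q * 2 = r / 2 ^ k + 2 * (2 ^ (w - k - 1) * q) by ring,
      Int.add_mul_emod_self_left]

-- bits of m >> a are the bits of m shifted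
lemma pvBit_shift (m : Int) (a k : Nat) : pvBit (m >>> a) k = pvBit m (a + k) := by
  unfold pvBit
  rw [← Int.shiftRight_add]

-- the split identity both halves of B's recursion rely on
lemma pvVal_split (m : Int) (c : Nat) (hc : c < 3) (h n : Nat) (hh : h ≤ n) :
    pvVal m c n =
      pvVal (PySem.Int.mod m ((2:Int) ^ (3 * h))) c h + pvVal (m >>> (3 * h)) c (n - h) * 2 ^ h := by
  have hn : n = h + (n - h) := by omega
  rw [pvVal]
  conv_lhs => rw [hn]
  rw [Finset.sum_range_add]
  congr 1
  · rw [pvVal]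
    refine Finset.sum_congr rfl (fun i hi => ?_)
    have hi' : i < h := Finset.mem_range.mp hi
    rw [pvBit_mod m (3 * h) (3 * i + c) (by omega)]
  · rw [pvVal, Finset.sum_mul]
    refine Finset.sum_congr rfl (fun i hi => ?_)
    rw [pvBit_shift m (3 * h) (3 * i + c)]
    rw [show 3 * h + (3 * i + c) = 3 * (h + i) + c by ring, pow_add]
    ring

-- B's recursion computes the same coordinate values
lemma pvDecB_correct (n : Nat) : ∀ (m : Int),
    pvDecB m (n : Int) = (pvVal m 0 n, pvVal m 1 n, pvVal m 2 n) := by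
  induction n using Nat.strong_induction_on with
  | _ n ih =>
    intro m
    rw [pvDecB]
    by_cases h0 : (n : Int) ≤ 0 ∨ m = 0
    · rw [if_pos h0]
      rcases h0 with h0 | h0
      · have : n = 0 := by omega
        subst this
        simp [pvVal_zero]
      · subst h0
        rw [pvVal_zero_left, pvVal_zero_left, pvVal_zero_left]
    · rw [if_neg h0]
      have h0 : ¬ (n : Int) ≤ 0 := fun h => h0 (Or.inl h)
      by_cases h1 : (n : Int) = 1
      · rw [if_pos h1]
        have hn1 : n = 1 := by omega
        subst hn1
        have e : ∀ c : Nat, pvVal m c 1 = pvBit m c := by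
          intro c
          simp [pvVal]
        rw [e 0, e 1, e 2]
        unfold pvBit
        rw [Int.shiftRight_zero]
      · rw [if_neg h1]
        have hn2 : 2 ≤ n := by omega
        have hfd : PySem.Int.floordiv (n : Int) 2 = ((n / 2 : Nat) : Int) := by
          exact_mod_cast PySem.Int.floordiv_natCast n 2
        set hh : Nat := n / 2 with hhh
        have hlo : 1 ≤ hh := by omega
        have hhi : hh < n := by omega
        simp only [hfd]
        have e1 : ((3 : Int) * (hh : Int)).toNat = 3 * hh := by omega
        have e2 : ((hh : Int)).toNat = hh := by omega
        have e3 : (n : Int) - (hh : Int) = ((n - hh : Nat) : Int) := by omega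
        rw [e1, e2, e3]
        rw [ih hh hhi, ih (n - hh) (by omega)]
        have hsl : (1 : Int) <<< (3 * hh) = 2 ^ (3 * hh) := by
          rw [Int.shiftLeft_eq, one_mul]
        rw [hsl]
        simp only
        refine Prod.ext ?_ (Prod.ext ?_ ?_) <;> simp only <;>
          rw [Int.shiftLeft_eq, pvVal_split m _ (by omega) hh n (by omega)]

-- ===== VERDICT (by name: the statement is the Claim_ definition above) =====
theorem morton_decode_3d_spec : Claim_equal_morton_decode_3d := by
  intro t order _
  unfold Spec_morton_decode_3d morton_decode_3d morton_decode_3d_alt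
  have hmax : max order 0 = ((order.toNat : Nat) : Int) := by omega
  rw [hmax, pvDecB_correct order.toNat t]
  by_cases h : 0 < order
  · have hord : ((order.toNat : Nat) : Int) = order := Int.toNat_of_nonneg h.le
    have hA := portA_loop t order.toNat
    rw [hord] at hA
    rw [hA]
  · have h0 : order ≤ 0 := not_lt.mp h
    have hz : order.toNat = 0 := by omega
    rw [PySem.List.pyRange_one_eq_nil h0, hz]
    simp [pvVal_zero]
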